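-- pv_equiv track=rewrite | github.com/kevin123488/algorithm | 2024/10월/1013/pccp_puzzle.py | check_ans
-- ===== SOURCE A (Python) =====
-- def check_ans(answer, diffs, times, limit):
--     n = len(diffs)
--     check_limit = 0
--     for i in range(n):
--         if answer >= diffs[i]:
--             check_limit += times[i]
--         else:
--             if i == 0:
--                 check_limit += (diffs[i] - answer) * times[i]
--             else:
--                 check_limit += (times[i - 1] + times[i]) * (diffs[i] - answer)
--             check_limit += times[i]
--         # if check_limit > limit:
--         #     return False
--
--     if check_limit <= limit:
--         return 1
--     else:
--         return 0
-- ===== SOURCE B (Python) =====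
-- def check_ans(answer, diffs, times, limit):
--     def cost(ds, ts, prev):
--         # total cost of this puzzle segment; prev is the solve time of the
--         # puzzle just before the segment (None at the very front)
--         if not ds:
--             return 0
--         if len(ds) == 1:
--             d, t = ds[0], ts[0]
--             if answer >= d:
--                 return t
--             return t + (d - answer) * (t if prev is None else prev + t)
--         mid = len(ds) // 2
--         return cost(ds[:mid], ts[:mid], prev) + cost(ds[mid:], ts[mid:], ts[mid - 1])
--     return 1 if cost(diffs, times, None) <= limit else 0
-- ===== Notes on version B (the rewrite author's own statement) =====
-- stated objective: alternative
-- what changed: Replaces the index-driven accumulator loop by a divide-and-conquer recursion over the list: a segment's cost is the sum of its halves' costs, with the preceding solve time threaded as a 'prev' parameter so the i==0 / times[i-1] index logic disappears.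
import Mathlib
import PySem

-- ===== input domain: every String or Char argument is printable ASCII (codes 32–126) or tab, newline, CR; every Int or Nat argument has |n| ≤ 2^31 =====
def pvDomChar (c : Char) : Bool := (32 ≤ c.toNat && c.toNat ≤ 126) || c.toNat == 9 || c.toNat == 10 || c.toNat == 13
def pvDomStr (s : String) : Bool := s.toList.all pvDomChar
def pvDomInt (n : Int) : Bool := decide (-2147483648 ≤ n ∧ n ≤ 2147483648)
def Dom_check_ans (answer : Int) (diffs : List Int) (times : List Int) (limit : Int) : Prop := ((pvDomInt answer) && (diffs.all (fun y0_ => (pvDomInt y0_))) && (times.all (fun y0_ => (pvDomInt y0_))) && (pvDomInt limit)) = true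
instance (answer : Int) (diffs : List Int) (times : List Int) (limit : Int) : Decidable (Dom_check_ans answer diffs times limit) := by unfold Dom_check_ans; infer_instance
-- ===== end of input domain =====

-- B replaces A's index loop by a divide-and-conquer recursion over the list (same result,
-- different structure; not claimed faster).

-- ===== PORT A =====
def check_ans (answer : Int) (diffs : List Int) (times : List Int) (limit : Int) : Int :=
  let n : Int := diffs.length
  let check_limit :=
    (PySem.List.pyRange 0 n 1).foldl (fun acc i =>
      let d := PySem.List.pyGetD diffs i 0
      let t := PySem.List.pyGetD times i 0
      if answer ≥ d then acc + t
      else (if i = 0 then acc + (d - answer) * t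
            else acc + (PySem.List.pyGetD times (i - 1) 0 + t) * (d - answer)) + t) 0
  if check_limit ≤ limit then 1 else 0

-- ===== PORT B =====
-- cost(ds, ts, prev) of Source B: divide and conquer on the segment
def check_ans_cost (answer : Int) (ds : List Int) (ts : List Int) (prev : Option Int) : Int :=
  if _h0 : ds = [] then 0
  else if _h1 : ds.length = 1 then
    let d := PySem.List.pyGetD ds 0 0
    let t := PySem.List.pyGetD ts 0 0
    if answer ≥ d then t
    else t + (d - answer) * (match prev with | none => t | some p => p + t)
  else
    let mid : Nat := ds.length / 2
    check_ans_cost answer (ds.take mid) (ts.take mid) prev +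
    check_ans_cost answer (ds.drop mid) (ts.drop mid)
      (some (PySem.List.pyGetD ts ((mid : Int) - 1) 0))
termination_by ds.length
decreasing_by
  all_goals
    (simp only [List.length_take, List.length_drop]
     have hne : ds.length ≠ 0 := fun h => _h0 (List.length_eq_zero_iff.mp h)
     omega)

def check_ans_alt (answer : Int) (diffs : List Int) (times : List Int) (limit : Int) : Int :=
  if check_ans_cost answer diffs times none ≤ limit then 1 else 0

-- ===== PRECONDITION & SPEC =====
-- Pre_ excludes exactly the inputs where Python A raises IndexError: times shorter than diffs.
def Pre_check_ans (answer : Int) (diffs : List Int) (times : List Int) (limit : Int) : Prop :=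
  diffs.length ≤ times.length
instance (answer : Int) (diffs : List Int) (times : List Int) (limit : Int) : Decidable (Pre_check_ans answer diffs times limit) := by unfold Pre_check_ans; infer_instance
def pvWitness_check_ans : Int × List Int × List Int × Int := (5, [3, 7], [2, 4], 100)

def Spec_check_ans (answer : Int) (diffs : List Int) (times : List Int) (limit : Int) (out : Int) : Prop := out = check_ans_alt answer diffs times limit
instance (answer : Int) (diffs : List Int) (times : List Int) (limit : Int) (out : Int) : Decidable (Spec_check_ans answer diffs times limit out) := by unfold Spec_check_ans; infer_instance

-- ===== CLAIM (what is proved, stated in full; the proofs are below) =====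
def Claim_equal_check_ans : Prop := ∀ (answer : Int) (diffs : List Int) (times : List Int) (limit : Int), Dom_check_ans answer diffs times limit → Pre_check_ans answer diffs times limit → Spec_check_ans answer diffs times limit (check_ans answer diffs times limit)

-- ===== LEMMAS AND PROOFS =====

-- common per-index summand: both programs' cost is the sum of gA over the indices
def gA (answer : Int) (ds ts : List Int) (prev : Option Int) (k : Nat) : Int :=
  let d := ds.getD k 0
  let t := ts.getD k 0
  t + if answer < d then
        (d - answer) * (if k = 0 then (match prev with | none => t | some p => p + t)
                        else ts.getD (k - 1) 0 + t)
      else 0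

-- A's loop body, as a function of the index
def fA (answer : Int) (diffs times : List Int) (i : Int) : Int :=
  let d := PySem.List.pyGetD diffs i 0
  let t := PySem.List.pyGetD times i 0
  t + if answer < d then
        (d - answer) * (if i = 0 then t else PySem.List.pyGetD times (i - 1) 0 + t)
      else 0

theorem fA_step (answer : Int) (diffs times : List Int) (acc i : Int) :
    (let d := PySem.List.pyGetD diffs i 0
     let t := PySem.List.pyGetD times i 0
     if answer ≥ d then acc + t
     else (if i = 0 then acc + (d - answer) * t
           else acc + (PySem.List.pyGetD times (i - 1) 0 + t) * (d - answer)) + t)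
    = acc + fA answer diffs times i := by
  unfold fA
  simp only []
  by_cases h : answer ≥ PySem.List.pyGetD diffs i 0
  · rw [if_pos h, if_neg (show ¬ answer < PySem.List.pyGetD diffs i 0 by omega)]; ring
  · rw [if_neg h, if_pos (show answer < PySem.List.pyGetD diffs i 0 by omega)]
    by_cases h0 : i = 0
    · rw [if_pos h0, if_pos h0]; ring
    · rw [if_neg h0, if_neg h0]; ring

theorem foldA_sum (answer : Int) (diffs times : List Int) :
    ∀ (l : List Int) (acc : Int),
      l.foldl (fun acc i =>
        let d := PySem.List.pyGetD diffs i 0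
        let t := PySem.List.pyGetD times i 0
        if answer ≥ d then acc + t
        else (if i = 0 then acc + (d - answer) * t
              else acc + (PySem.List.pyGetD times (i - 1) 0 + t) * (d - answer)) + t) acc
      = acc + (l.map (fA answer diffs times)).sum := by
  intro l
  induction l with
  | nil => intro acc; simp
  | cons x xs ih =>
    intro acc
    rw [List.foldl_cons, ih, List.map_cons, List.sum_cons, fA_step]
    ring

theorem fA_cast (answer : Int) (diffs times : List Int) (k : Nat) :
    fA answer diffs times ((k : Nat) : Int) = gA answer diffs times none k := by
  unfold fA gA
  simp only [PySem.List.pyGetD_natCast]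
  by_cases h0 : k = 0
  · subst h0; norm_num
  · have hne : ((k : Nat) : Int) ≠ 0 := by exact_mod_cast h0
    rw [if_neg hne, if_neg h0]
    have hc : ((k : Nat) : Int) - 1 = (((k - 1 : Nat)) : Int) := by omega
    rw [hc, PySem.List.pyGetD_natCast]

-- A's port computes the gA-sum
theorem check_ans_eq (answer : Int) (diffs times : List Int) (limit : Int) :
    check_ans answer diffs times limit
      = (if ((List.range diffs.length).map (gA answer diffs times none)).sum ≤ limit
         then 1 else 0) := by
  unfold check_ans
  simp only []
  rw [foldA_sum]
  have hr : PySem.List.pyRange 0 (diffs.length : Int) 1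
      = (List.range diffs.length).map (fun k => ((k : Nat) : Int)) := by
    rw [PySem.List.pyRange_one]
    simp
  rw [hr, List.map_map]
  have : (fA answer diffs times ∘ fun k => ((k : Nat) : Int))
      = gA answer diffs times none := by
    funext k; exact fA_cast answer diffs times k
  rw [this]
  norm_num

theorem getD_take (xs : List Int) (m k : Nat) (h : k < m) :
    (xs.take m).getD k 0 = xs.getD k 0 := by
  simp [List.getD_eq_getElem?_getD, h]

theorem getD_drop (xs : List Int) (m k : Nat) :
    (xs.drop m).getD k 0 = xs.getD (m + k) 0 := by
  simp [List.getD_eq_getElem?_getD, List.getElem?_drop]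

-- B's divide-and-conquer recursion computes the same gA-sum
theorem costB_eq_sum (answer : Int) (ds ts : List Int) (prev : Option Int) :
    check_ans_cost answer ds ts prev
      = ((List.range ds.length).map (gA answer ds ts prev)).sum := by
  induction ds, ts, prev using check_ans_cost.induct answer with
  | case1 ts prev =>
    simp [check_ans_cost]
  | case2 ds ts prev h0 h1 dv hge =>
    rw [check_ans_cost, dif_neg h0, dif_pos h1, h1]
    simp only [List.range_one, List.map_cons, List.map_nil, List.sum_cons, List.sum_nil]
    unfold gA
    simp only []
    have hd : PySem.List.pyGetD ds 0 0 = ds.getD 0 0 := by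
      have := PySem.List.pyGetD_natCast ds 0 (0 : Int)
      simpa using this
    have ht : PySem.List.pyGetD ts 0 0 = ts.getD 0 0 := by
      have := PySem.List.pyGetD_natCast ts 0 (0 : Int)
      simpa using this
    rw [hd, ht]
    by_cases h : answer ≥ ds.getD 0 0
    · rw [if_pos h, if_neg (show ¬ answer < ds.getD 0 0 by omega)]; ring
    · rw [if_neg h, if_pos (show answer < ds.getD 0 0 by omega)]
      simp only [if_true]
      ring
  | case3 ds ts prev h0 h1 dv hlt =>
    rw [check_ans_cost, dif_neg h0, dif_pos h1, h1]
    simp only [List.range_one, List.map_cons, List.map_nil, List.sum_cons, List.sum_nil]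
    unfold gA
    simp only []
    have hd : PySem.List.pyGetD ds 0 0 = ds.getD 0 0 := by
      have := PySem.List.pyGetD_natCast ds 0 (0 : Int)
      simpa using this
    have ht : PySem.List.pyGetD ts 0 0 = ts.getD 0 0 := by
      have := PySem.List.pyGetD_natCast ts 0 (0 : Int)
      simpa using this
    rw [hd, ht]
    by_cases h : answer ≥ ds.getD 0 0
    · rw [if_pos h, if_neg (show ¬ answer < ds.getD 0 0 by omega)]; ring
    · rw [if_neg h, if_pos (show answer < ds.getD 0 0 by omega)]
      simp only [if_true]
      ring
  | case4 ds ts prev h0 h1 midv ih1 ih2 =>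
    have hmideq : midv = ds.length / 2 := rfl
    rw [hmideq] at ih1 ih2
    rw [check_ans_cost, dif_neg h0, dif_neg h1]
    simp only []
    have hlen2 : 2 ≤ ds.length := by
      have hne : ds.length ≠ 0 := fun h => h0 (List.length_eq_zero_iff.mp h)
      omega
    set n := ds.length with hn
    have hmid1 : 1 ≤ n / 2 := by omega
    have hmidlt : n / 2 < n := by omega
    rw [ih1, ih2]
    have hlt : (ds.take (n / 2)).length = n / 2 := by
      simp [List.length_take]; omega
    have hld : (ds.drop (n / 2)).length = n - n / 2 := by
      simp only [List.length_drop]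
      omega
    rw [hlt, hld]
    have hsplit : List.range n = List.range (n / 2) ++ (List.range (n - n / 2)).map (fun j => n / 2 + j) := by
      have hnn : n = n / 2 + (n - n / 2) := by omega
      conv_lhs => rw [hnn]
      rw [List.range_add]
    rw [hsplit, List.map_append, List.sum_append, List.map_map]
    congr 1
    · -- left segment
      refine congrArg List.sum (List.map_congr_left ?_)
      intro k hk
      rw [List.mem_range] at hk
      unfold gA
      simp only []
      rw [getD_take ds _ _ hk, getD_take ts _ _ hk]
      by_cases h0k : k = 0
      · simp [h0k]
      · have hk1 : k - 1 < n / 2 := by omega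
        rw [if_neg h0k, if_neg h0k, getD_take ts _ _ hk1]
    · -- right segment
      refine congrArg List.sum (List.map_congr_left ?_)
      intro j hj
      rw [List.mem_range] at hj
      simp only [Function.comp]
      unfold gA
      simp only []
      rw [getD_drop ds, getD_drop ts]
      have hptc : PySem.List.pyGetD ts (((n / 2 : Nat) : Int) - 1) 0 = ts.getD (n / 2 - 1) 0 := by
        have hc : (((n / 2 : Nat)) : Int) - 1 = (((n / 2 - 1 : Nat)) : Int) := by omega
        rw [hc, PySem.List.pyGetD_natCast]
      by_cases hj0 : j = 0
      · subst hj0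
        rw [if_pos rfl, if_neg (show ¬ (n / 2 + 0 = 0) by omega)]
        rw [hptc]
        norm_num
      · rw [if_neg hj0, if_neg (show ¬ (n / 2 + j = 0) by omega)]
        rw [getD_drop ts]
        have harith : n / 2 + (j - 1) = n / 2 + j - 1 := by omega
        rw [harith]

-- ===== VERDICT (by name: the statement is the Claim_ definition above) =====
theorem check_ans_spec : Claim_equal_check_ans := by
  intro answer diffs times limit _ _
  unfold Spec_check_ans
  rw [check_ans_eq]
  unfold check_ans_alt
  rw [costB_eq_sum]
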